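-- pv_equiv track=rewrite | github.com/ChrisFischer-MTA/scoringengine | scoring_engine/web/views/api/team.py | calculate_ranks
-- ===== SOURCE A (Python) =====
-- def calculate_ranks(score_dict):
--     """
--     Calculate ranks for a dict of {id: score} with tie handling.
--
--     Returns dict of {id: rank} where ties get the same rank.
--     E.g., scores [100, 90, 90, 80] -> ranks [1, 2, 2, 4]
--     """
--     if not score_dict:
--         return {}
--
--     # Sort by score descending
--     sorted_items = sorted(score_dict.items(), key=lambda x: x[1], reverse=True)
--
--     ranks = {}
--     current_rank = 1
--     prev_score = None
--
--     for i, (item_id, score) in enumerate(sorted_items):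
--         if prev_score is not None and score < prev_score:
--             current_rank = i + 1  # Skip ranks for ties
--         ranks[item_id] = current_rank
--         prev_score = score
--
--     return ranks
-- ===== SOURCE B (Python) =====
-- def calculate_ranks(score_dict):
--     """Ranks via a score->rank table: a score's rank is 1 + the index of its
--     first occurrence in the order sorted by score descending."""
--     items = sorted(score_dict.items(), key=lambda x: x[1], reverse=True)
--     rank_of = {}
--     seen = 0
--     for _, score in items:
--         if score not in rank_of:
--             rank_of[score] = seen + 1
--         seen += 1
--     return {item_id: rank_of[score] for item_id, score in items}
-- ===== Notes on version B (the rewrite author's own statement) =====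
-- stated objective: alternative
-- what changed: Replaces A's stateful enumerate scan (current_rank/prev_score bookkeeping interleaved with building the result) with two passes: first build a score->rank table keyed by each score's first position in the sorted order, then map every id through that table.
import Mathlib
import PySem

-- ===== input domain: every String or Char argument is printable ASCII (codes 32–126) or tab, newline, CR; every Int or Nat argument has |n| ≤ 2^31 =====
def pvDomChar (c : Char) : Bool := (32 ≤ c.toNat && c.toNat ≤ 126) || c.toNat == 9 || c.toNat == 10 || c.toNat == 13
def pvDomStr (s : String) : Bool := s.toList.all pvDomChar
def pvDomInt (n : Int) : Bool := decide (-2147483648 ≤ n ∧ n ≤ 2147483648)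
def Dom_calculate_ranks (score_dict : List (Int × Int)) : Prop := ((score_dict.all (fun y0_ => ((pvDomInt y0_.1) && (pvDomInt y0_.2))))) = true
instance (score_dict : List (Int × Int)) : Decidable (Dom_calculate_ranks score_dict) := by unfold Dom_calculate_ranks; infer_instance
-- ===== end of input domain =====

-- B replaces A's stateful scan with a strictly-greater count per id (an alternative decomposition, not faster).

-- ===== PORT A =====
-- the 'for i, (item_id, score) in enumerate(sorted_items)' loop, state = (ranks, current_rank, prev_score), i the index
def rankLoop : List (Int × Int) → PySem.Dict Int Int → Int → Option Int → Int → PySem.Dict Int Int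
  | [], ranks, _, _, _ => ranks
  | (item_id, score) :: rest, ranks, current_rank, prev_score, i =>
    let current_rank' :=
      match prev_score with
      | some p => if score < p then i + 1 else current_rank
      | none => current_rank
    rankLoop rest (ranks.insert item_id current_rank') current_rank' (some score) (i + 1)

def calculate_ranks (score_dict : List (Int × Int)) : List (Int × Int) :=
  if score_dict = [] then []
  else
    let sorted_items := PySem.List.sorted score_dict (fun x => x.2) true
    (rankLoop sorted_items PySem.Dict.empty 1 none 0).items

-- ===== PORT B =====
-- the 'for _, score in items' table-building loop of B, state = (rank_of, seen)
def tableLoop : List (Int × Int) → PySem.Dict Int Int → Int → PySem.Dict Int Int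
  | [], rank_of, _ => rank_of
  | (_, score) :: rest, rank_of, seen =>
    let rank_of' := if rank_of.contains score then rank_of else rank_of.insert score (seen + 1)
    tableLoop rest rank_of' (seen + 1)

def calculate_ranks_alt (score_dict : List (Int × Int)) : List (Int × Int) :=
  let items := PySem.List.sorted score_dict (fun x => x.2) true
  let rank_of := tableLoop items PySem.Dict.empty 0
  -- rank_of[score]: the first pass put every score of items into rank_of, so getD is exact here
  items.map (fun p => (p.1, rank_of.getD p.2 0))

-- ===== PRECONDITION & SPEC =====
-- Pre_ only requires distinct ids: the argument encodes a Python dict, whose keys are necessarily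
-- distinct, so this excludes no input the Python A can receive.
def Pre_calculate_ranks (score_dict : List (Int × Int)) : Prop := (score_dict.map Prod.fst).Nodup
instance (score_dict : List (Int × Int)) : Decidable (Pre_calculate_ranks score_dict) := by unfold Pre_calculate_ranks; infer_instance
def pvWitness_calculate_ranks : (List (Int × Int)) := [(1, 100), (2, 90), (3, 90), (4, 80)]

def Spec_calculate_ranks (score_dict : List (Int × Int)) (out : List (Int × Int)) : Prop := out = calculate_ranks_alt score_dict
instance (score_dict : List (Int × Int)) (out : List (Int × Int)) : Decidable (Spec_calculate_ranks score_dict out) := by unfold Spec_calculate_ranks; infer_instance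

-- ===== CLAIM (what is proved, stated in full; the proofs are below) =====
def Claim_equal_calculate_ranks : Prop := ∀ (score_dict : List (Int × Int)), Dom_calculate_ranks score_dict → Pre_calculate_ranks score_dict → Spec_calculate_ranks score_dict (calculate_ranks score_dict)

-- ===== LEMMAS AND PROOFS =====

-- rank of a score s relative to the sorted list T: 1 + (number of strictly greater scores)
def rnk (T : List (Int × Int)) (s : Int) : Int := 1 + (T.countP (fun x => decide (s < x.2)) : Int)

lemma rankLoop_items
    (T : List (Int × Int)) (hP : T.Pairwise (fun a b => b.2 ≤ a.2))
    (hK : (T.map Prod.fst).Nodup) :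
    ∀ (l pre : List (Int × Int)) (ranks : PySem.Dict Int Int) (cur : Int) (prev : Option Int),
      T = pre ++ l →
      ranks.items = pre.map (fun x => (x.1, rnk T x.2)) →
      ((prev = none ∧ cur = 1 ∧ pre = []) ∨
       (∃ p, prev = some p ∧ cur = rnk T p ∧ (∀ x ∈ pre, p ≤ x.2) ∧ (∀ y ∈ l, y.2 ≤ p))) →
      (rankLoop l ranks cur prev (pre.length : Int)).items = T.map (fun x => (x.1, rnk T x.2)) := by
  intro l
  induction l with
  | nil =>
    intro pre ranks cur prev hT hR _
    simpa [rankLoop, hT] using hR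
  | cons hd rest ih =>
    intro pre ranks cur prev hT hR hinv
    obtain ⟨id, s⟩ := hd
    -- order facts from the sortedness of T
    have hPsplit := hT ▸ hP
    rw [List.pairwise_append] at hPsplit
    obtain ⟨hPpre, hPcons, hcross⟩ := hPsplit
    have hrest_le : ∀ y ∈ rest, y.2 ≤ s := by
      intro y hy; exact (List.pairwise_cons.mp hPcons).1 y hy
    have hpre_ge : ∀ x ∈ pre, s ≤ x.2 := by
      intro x hx; exact hcross x hx (id, s) (List.mem_cons_self ..)
    have hcons_cnt : ((id, s) :: rest).countP (fun x => decide (s < x.2)) = 0 := by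
      refine List.countP_eq_zero.mpr ?_
      intro a ha; rcases List.mem_cons.mp ha with h | h
      · subst h; simp
      · have := hrest_le a h; simp; omega
    -- the inserted key is fresh, so the insert appends
    have hid_not : id ∉ pre.map Prod.fst := by
      rw [hT, List.map_append] at hK
      have hdisj := (List.nodup_append.mp hK).2.2
      intro hmem
      exact hdisj id hmem id (by simp) rfl
    have hcontains : ranks.contains id = false := by
      rw [PySem.Dict.contains_eq_decide_mem_keys]
      have hkeys : ranks.keys = pre.map Prod.fst := by
        show ranks.items.map (·.1) = _
        rw [hR]; simp
      simp [hkeys, hid_not]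
    -- one generic application of the induction hypothesis
    have happly : ∀ cur' : Int, cur' = rnk T s →
        (rankLoop rest (ranks.insert id cur') cur' (some s) ((pre.length : Int) + 1)).items
          = T.map (fun x => (x.1, rnk T x.2)) := by
      intro cur' hcur'
      have hT' : T = (pre ++ [(id, s)]) ++ rest := by simpa [List.append_assoc] using hT
      have hR' : (ranks.insert id cur').items
          = (pre ++ [(id, s)]).map (fun x => (x.1, rnk T x.2)) := by
        rw [PySem.Dict.items_insert_of_not_contains _ _ hcontains, hR, hcur']
        simp
      have hlen : (pre.length : Int) + 1 = (((pre ++ [(id, s)]).length : Nat) : Int) := by simp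
      rw [hlen]
      refine ih (pre ++ [(id, s)]) _ _ _ hT' hR' (Or.inr ⟨s, rfl, hcur'.symm ▸ rfl, ?_, hrest_le⟩)
      intro x hx
      rcases List.mem_append.mp hx with h | h
      · exact hpre_ge x h
      · simp only [List.mem_singleton] at h; subst h; simp
    rcases prev with _ | p
    · -- prev is None: pre = [] and current_rank stays 1
      rcases hinv with ⟨-, hcur, hpre⟩ | ⟨p, hprev, -⟩
      · subst hpre
        have hcur1 : cur = rnk T s := by
          simp only [List.nil_append] at hT
          simp [hcur, rnk, hT, hcons_cnt]
        simpa only [rankLoop] using happly cur hcur1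
      · exact absurd hprev (by simp)
    · -- prev = some p, the score of the previous (higher-or-equal-ranked) item
      rcases hinv with ⟨hprev, -⟩ | ⟨p', hprev, hcur, hple, hlle⟩
      · exact absurd hprev (by simp)
      obtain rfl : p = p' := Option.some.inj hprev
      by_cases hsp : s < p
      · -- strictly smaller score: rank jumps to i + 1 = pre.length + 1
        have hnew : (pre.length : Int) + 1 = rnk T s := by
          have hprecnt : pre.countP (fun x => decide (s < x.2)) = pre.length := by
            refine List.countP_eq_length.mpr ?_
            intro a ha; have := hple a ha; simp; omega
          rw [rnk, hT, List.countP_append, hprecnt, hcons_cnt]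
          push_cast; ring
        simp only [rankLoop]
        rw [if_pos hsp]
        exact happly _ hnew
      · -- tie: s = p and the rank is unchanged
        have hsle : s ≤ p := hlle (id, s) (List.mem_cons_self ..)
        have hsp' : s = p := by omega
        have hold : cur = rnk T s := by rw [hcur, hsp']
        simp only [rankLoop]
        rw [if_neg hsp]
        exact happly cur hold

lemma ofList_append_singleton (xs : List Int) (x : Int) :
    PySem.Set.ofList (xs ++ [x]) = PySem.Set.add (PySem.Set.ofList xs) x := by
  rw [PySem.Set.ofList_eq_foldl, PySem.Set.ofList_eq_foldl, List.foldl_append]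
  rfl

lemma tableLoop_items
    (T : List (Int × Int)) (hP : T.Pairwise (fun a b => b.2 ≤ a.2)) :
    ∀ (l pre : List (Int × Int)) (ro : PySem.Dict Int Int),
      T = pre ++ l →
      ro.items = (PySem.Set.ofList (pre.map (fun x => x.2))).map (fun s => (s, rnk T s)) →
      (tableLoop l ro (pre.length : Int)).items
        = (PySem.Set.ofList (T.map (fun x => x.2))).map (fun s => (s, rnk T s)) := by
  intro l
  induction l with
  | nil =>
    intro pre ro hT hR
    simpa [tableLoop, hT] using hR
  | cons hd rest ih =>
    intro pre ro hT hR
    obtain ⟨id, s⟩ := hd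
    have hPsplit := hT ▸ hP
    rw [List.pairwise_append] at hPsplit
    obtain ⟨hPpre, hPcons, hcross⟩ := hPsplit
    have hrest_le : ∀ y ∈ rest, y.2 ≤ s := fun y hy => (List.pairwise_cons.mp hPcons).1 y hy
    have hpre_ge : ∀ x ∈ pre, s ≤ x.2 := fun x hx => hcross x hx (id, s) (List.mem_cons_self ..)
    have hkeys : ro.keys = PySem.Set.ofList (pre.map (fun x => x.2)) := by
      show ro.items.map (·.1) = _
      rw [hR, List.map_map]
      rw [show ((fun x : Int × Int => x.1) ∘ fun s : Int => (s, rnk T s)) = fun s : Int => s from rfl]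
      exact List.map_id' _
    have hT' : T = (pre ++ [(id, s)]) ++ rest := by simpa [List.append_assoc] using hT
    have hlen : (pre.length : Int) + 1 = (((pre ++ [(id, s)]).length : Nat) : Int) := by simp
    have hmapsnd : (pre ++ [(id, s)]).map (fun x => x.2) = pre.map (fun x => x.2) ++ [s] := by simp
    by_cases hmem : s ∈ pre.map (fun x => x.2)
    · -- the score was seen before: the table is unchanged
      have hc : ro.contains s = true := by
        rw [PySem.Dict.contains_eq_decide_mem_keys, hkeys]
        simp [PySem.Set.mem_ofList, hmem]
      have hR' : ro.items
          = (PySem.Set.ofList ((pre ++ [(id, s)]).map (fun x => x.2))).map (fun s => (s, rnk T s)) := by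
        rw [hmapsnd, ofList_append_singleton, PySem.Set.add_of_mem ((PySem.Set.mem_ofList _ _).mpr hmem)]
        exact hR
      simp only [tableLoop, hc, if_pos]
      rw [hlen]
      exact ih _ _ hT' hR'
    · -- first occurrence of the score: its rank is seen + 1 = pre.length + 1 = rnk T s
      have hc : ro.contains s = false := by
        rw [PySem.Dict.contains_eq_decide_mem_keys, hkeys]
        simp [PySem.Set.mem_ofList, hmem]
      have hrnk : (pre.length : Int) + 1 = rnk T s := by
        have hprecnt : pre.countP (fun x => decide (s < x.2)) = pre.length := by
          refine List.countP_eq_length.mpr ?_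
          intro a ha
          have h1 := hpre_ge a ha
          have h2 : ¬ s = a.2 := fun h => hmem (h ▸ List.mem_map_of_mem ha)
          simp; omega
        have hcons_cnt : ((id, s) :: rest).countP (fun x => decide (s < x.2)) = 0 := by
          refine List.countP_eq_zero.mpr ?_
          intro a ha; rcases List.mem_cons.mp ha with h | h
          · subst h; simp
          · have := hrest_le a h; simp; omega
        rw [rnk, hT, List.countP_append, hprecnt, hcons_cnt]
        push_cast; ring
      have hR' : (ro.insert s ((pre.length : Int) + 1)).items
          = (PySem.Set.ofList ((pre ++ [(id, s)]).map (fun x => x.2))).map (fun s => (s, rnk T s)) := by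
        rw [PySem.Dict.items_insert_of_not_contains _ _ hc, hR, hmapsnd, ofList_append_singleton,
          PySem.Set.add_of_not_mem (fun h => hmem ((PySem.Set.mem_ofList _ _).mp h)), hrnk]
        simp
      have hR'' : (ro.insert s (((pre ++ [(id, s)]).length : Nat) : Int)).items
          = (PySem.Set.ofList ((pre ++ [(id, s)]).map (fun x => x.2))).map (fun s => (s, rnk T s)) := by
        rw [← hlen]; exact hR'
      simp only [tableLoop, hc, Bool.false_eq_true, if_false]
      rw [hlen]
      exact ih _ _ hT' hR''

-- ===== VERDICT (by name: the statement is the Claim_ definition above) =====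
theorem calculate_ranks_spec : Claim_equal_calculate_ranks := by
  intro sd hdom hpre
  unfold Spec_calculate_ranks calculate_ranks calculate_ranks_alt
  by_cases hnil : sd = []
  · subst hnil
    simp [show PySem.List.sorted ([] : List (Int × Int)) (fun x => x.2) true = [] from rfl]
  · rw [if_neg hnil]
    set T := PySem.List.sorted sd (fun x => x.2) true with hTdef
    have hPw : T.Pairwise (fun a b => b.2 ≤ a.2) := PySem.List.sorted_pairwise_rev ..
    have hperm : T.Perm sd := PySem.List.sorted_perm ..
    have hK : (T.map Prod.fst).Nodup := ((hperm.map Prod.fst).nodup_iff).mpr hpre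
    have hmain := rankLoop_items T hPw hK T [] PySem.Dict.empty 1 none rfl rfl (Or.inl ⟨rfl, rfl, rfl⟩)
    simp only [List.length_nil, Nat.cast_zero] at hmain
    rw [hmain]
    have htab := tableLoop_items T hPw T [] PySem.Dict.empty rfl (by rfl)
    simp only [List.length_nil, Nat.cast_zero] at htab
    refine List.map_congr_left ?_
    intro p hp
    have hsc : p.2 ∈ PySem.Set.ofList (T.map (fun x => x.2)) :=
      (PySem.Set.mem_ofList _ _).mpr (List.mem_map_of_mem hp)
    have hitem : (p.2, rnk T p.2) ∈ (tableLoop T PySem.Dict.empty 0).items := by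
      rw [htab]
      exact List.mem_map_of_mem hsc
    have hnodup : (tableLoop T PySem.Dict.empty 0).keys.Nodup := by
      show ((tableLoop T PySem.Dict.empty 0).items.map (·.1)).Nodup
      rw [htab, List.map_map]
      rw [show ((fun x : Int × Int => x.1) ∘ fun s : Int => (s, rnk T s)) = fun s : Int => s from rfl]
      rw [List.map_id']
      exact PySem.Set.nodup_ofList (T.map (fun x => x.2))
    rw [PySem.Dict.getD_of_mem_items _ hitem hnodup]
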